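-- pv_equiv track=rewrite | github.com/wzbbbb/LeetCode-OJ | Trapping Rain Water.py | calc
-- ===== SOURCE A (Python) =====
-- def calc(A):
--   n,res,que=len(A),0,[]
--   if n<=2: return 0,[]
--   que.append(A[0])
--   for i in range(1,n):
--     #print '===+',que[0]
--     if A[i] < que[0]:
--       que.append(A[i])
--     else:
--       m=len(que)
--       res+= (m-1)* que[0]
--       #print '--',que,res,'A[i]',A[i]
--       for j in range(1,m):
--         res-=que[j]
--       que=[]; que.append(A[i])
--       #print '==',res, A[i], m, que
--   #print que
--   return res,que
-- ===== SOURCE B (Python) =====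
-- def calc(A):
--     if len(A) <= 2:
--         return 0, []
--     # k = index of the last element that is >= the max of everything before it
--     # (= where A's never-closed final segment starts); no segment lists at all.
--     m, k = A[0], 0
--     for i, x in enumerate(A[1:], 1):
--         if x >= m:
--             m, k = x, i
--     # water against the running left maximum, only over the closed region A[:k]
--     m, res = A[0], 0
--     for x in A[1:k]:
--         m = max(m, x)
--         res += m - x
--     return res, A[k:]
-- ===== Notes on version B (the rewrite author's own statement) =====
-- stated objective: simpler
-- what changed: B never builds or closes decreasing segments/queues: one running-max scan just records the index k of the last element reaching the prefix maximum, the water is then a clamped running-max sum over A[1:k], and the leftover queue is the slice A[k:].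
import Mathlib
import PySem

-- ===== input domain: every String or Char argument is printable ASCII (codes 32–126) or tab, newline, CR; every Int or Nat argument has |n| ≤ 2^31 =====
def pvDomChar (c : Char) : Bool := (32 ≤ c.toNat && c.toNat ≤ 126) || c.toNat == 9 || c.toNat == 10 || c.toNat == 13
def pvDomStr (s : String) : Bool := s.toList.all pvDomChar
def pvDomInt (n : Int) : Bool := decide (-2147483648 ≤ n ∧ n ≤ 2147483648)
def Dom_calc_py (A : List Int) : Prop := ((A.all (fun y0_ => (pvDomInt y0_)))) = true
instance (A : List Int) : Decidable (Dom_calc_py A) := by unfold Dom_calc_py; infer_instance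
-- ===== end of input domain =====

-- B builds no segments/queue at all: a running-max scan locates the start k of the
-- final open segment, the water is a clamped running-max sum over A[1:k], and the
-- queue is the slice A[k:]; objective: simpler. A is total; return values agree everywhere.

-- ===== PORT A =====
-- A's loop over A[1:]: state (res, que); que is always nonempty, so que[0] = headD 0.
def calcLoopA : List Int → Int → List Int → Int × List Int
  | [], res, que => (res, que)
  | x :: rest, res, que =>
    if x < que.headD 0 then
      calcLoopA rest res (que ++ [x])
    else
      let m : Int := que.length
      let res1 := res + (m - 1) * que.headD 0
      -- inner loop: for j in range(1, m): res -= que[j]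
      let res2 := (que.drop 1).foldl (fun r q => r - q) res1
      calcLoopA rest res2 [x]

def calc_py (A : List Int) : Int × List Int :=
  if A.length ≤ 2 then (0, [])
  else
    match A with
    | [] => (0, [])
    | a :: rest => calcLoopA rest 0 [a]

-- ===== PORT B =====
-- Source B first loop: for i, x in enumerate(A[1:], 1): if x >= m: m, k = x, i
def findKLoop : List Int → Int → Nat → Nat → Int × Nat
  | [], m, _, k => (m, k)
  | x :: rest, m, i, k =>
    if x ≥ m then findKLoop rest x (i + 1) i else findKLoop rest m (i + 1) k

-- Source B second loop: for x in A[1:k]: m = max(m, x); res += m - x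
def waterTo : List Int → Int → Int → Int
  | [], _, res => res
  | x :: t, m, res => waterTo t (max m x) (res + (max m x - x))

def calc_py_alt (A : List Int) : Int × List Int :=
  if A.length ≤ 2 then (0, [])
  else
    match A with
    | [] => (0, [])
    | a :: rest =>
      let k := (findKLoop rest a 1 0).2
      -- A[1:k] = rest.take (k-1) (k ≤ len A); A[k:] = (a :: rest).drop k
      (waterTo (rest.take (k - 1)) a 0, (a :: rest).drop k)

-- ===== PRECONDITION & SPEC =====
def Spec_calc_py (A : List Int) (out : Int × List Int) : Prop := out = calc_py_alt A
instance (A : List Int) (out : Int × List Int) : Decidable (Spec_calc_py A out) := by unfold Spec_calc_py; infer_instance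

-- ===== CLAIM (what is proved, stated in full; the proofs are below) =====
def Claim_equal_calc_py : Prop := ∀ (A : List Int), Dom_calc_py A → Spec_calc_py A (calc_py A)

-- ===== LEMMAS AND PROOFS =====

-- proof-side: 1-based position of the LAST x ≥ running max in the list (0 if none)
def relK : List Int → Int → Nat
  | [], _ => 0
  | x :: rs, m =>
    if x ≥ m then (if relK rs x = 0 then 1 else 1 + relK rs x)
    else (if relK rs m = 0 then 0 else 1 + relK rs m)

theorem findKLoop_snd (rs : List Int) : ∀ (m : Int) (i k : Nat),
    (findKLoop rs m i k).2 = if relK rs m = 0 then k else i + relK rs m - 1 := by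
  induction rs with
  | nil => intro m i k; simp [findKLoop, relK]
  | cons x rs ih =>
    intro m i k
    rw [findKLoop, relK]
    by_cases h : x ≥ m
    · rw [if_pos h, if_pos h, ih]
      by_cases h0 : relK rs x = 0 <;> (simp [h0]; try omega)
    · rw [if_neg h, if_neg h, ih]
      by_cases h0 : relK rs m = 0 <;> (simp [h0]; try omega)

theorem waterTo_acc (l : List Int) : ∀ m r, waterTo l m r = r + waterTo l m 0 := by
  induction l with
  | nil => intro m r; simp [waterTo]
  | cons x t ih =>
    intro m r
    rw [waterTo, waterTo, ih, ih (max m x) (0 + _)]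
    ring

theorem foldl_sub_eq (l : List Int) : ∀ (r : Int),
    l.foldl (fun r q => r - q) r = r - l.sum := by
  induction l with
  | nil => intro r; simp
  | cons x xs ih => intro r; simp [List.foldl, ih, List.sum_cons]; ring

-- the main loop correspondence: A's segment loop on queue h :: st equals B's
-- running-max formulation, split on whether some later element reaches the max
theorem loop_eq (rest : List Int) : ∀ (h res : Int) (st : List Int),
    calcLoopA rest res (h :: st) =
      (if relK rest h = 0 then (res, h :: (st ++ rest))
       else (res + ((st.length : Int) * h - st.sum)
               + waterTo (rest.take (relK rest h - 1)) h 0,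
             rest.drop (relK rest h - 1))) := by
  induction rest with
  | nil => intro h res st; simp [calcLoopA, relK]
  | cons x rs ih =>
    intro h res st
    rw [calcLoopA, relK]
    by_cases hx : x < h
    · have hge : ¬ x ≥ h := by omega
      rw [if_pos (by simpa using hx), if_neg hge]
      simp only [List.cons_append]
      rw [ih]
      by_cases h0 : relK rs h = 0
      · simp [h0]
      · have h1 : relK rs h ≥ 1 := Nat.one_le_iff_ne_zero.mpr h0
        rw [if_neg h0, if_neg h0, if_neg (by omega)]
        have htake : (x :: rs).take (1 + relK rs h - 1) = x :: rs.take (relK rs h - 1) := by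
          have e : 1 + relK rs h - 1 = (relK rs h - 1) + 1 := by omega
          rw [e, List.take_succ_cons]
        have hdrop : (x :: rs).drop (1 + relK rs h - 1) = rs.drop (relK rs h - 1) := by
          have e : 1 + relK rs h - 1 = (relK rs h - 1) + 1 := by omega
          rw [e, List.drop_succ_cons]
        rw [htake, hdrop, waterTo, max_eq_left (le_of_lt hx),
            waterTo_acc (rs.take (relK rs h - 1)) h (0 + (h - x))]
        simp only [Prod.mk.injEq]
        refine ⟨?_, trivial⟩
        simp [List.sum_append]
        ring
    · have hge : x ≥ h := by omega
      rw [if_neg (by simpa using hx), if_pos hge, ih]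
      have hclose : (List.drop 1 (h :: st)).foldl (fun r q => r - q)
            (res + (((h :: st).length : Int) - 1) * ((h :: st).headD 0)) =
          res + ((st.length : Int) * h - st.sum) := by
        simp [foldl_sub_eq]; ring
      by_cases h0 : relK rs x = 0
      · rw [if_pos h0, if_pos h0, if_neg (by omega), hclose]
        simp [waterTo]
      · have h1 : relK rs x ≥ 1 := Nat.one_le_iff_ne_zero.mpr h0
        rw [if_neg h0, if_neg h0, if_neg (by omega), hclose]
        have htake : (x :: rs).take (1 + relK rs x - 1) = x :: rs.take (relK rs x - 1) := by
          have e : 1 + relK rs x - 1 = (relK rs x - 1) + 1 := by omega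
          rw [e, List.take_succ_cons]
        have hdrop : (x :: rs).drop (1 + relK rs x - 1) = rs.drop (relK rs x - 1) := by
          have e : 1 + relK rs x - 1 = (relK rs x - 1) + 1 := by omega
          rw [e, List.drop_succ_cons]
        rw [htake, hdrop, waterTo, max_eq_right hge,
            waterTo_acc (rs.take (relK rs x - 1)) x (0 + (x - x))]
        simp only [Prod.mk.injEq]
        refine ⟨?_, trivial⟩
        simp

-- ===== VERDICT (by name: the statement is the Claim_ definition above) =====
theorem calc_py_spec : Claim_equal_calc_py := by
  intro A _
  unfold Spec_calc_py
  cases A with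
  | nil => rfl
  | cons a rest =>
    simp only [calc_py, calc_py_alt]
    split_ifs with hlen
    · rfl
    · rw [loop_eq, findKLoop_snd]
      by_cases h0 : relK rest a = 0
      · simp [h0, waterTo]
      · have h1 : relK rest a ≥ 1 := Nat.one_le_iff_ne_zero.mpr h0
        rw [if_neg h0, if_neg h0]
        have e : 1 + relK rest a - 1 = relK rest a := by omega
        rw [e]
        have hd : (a :: rest).drop (relK rest a) = rest.drop (relK rest a - 1) := by
          have e2 : relK rest a = (relK rest a - 1) + 1 := by omega
          conv_lhs => rw [e2]
          rw [List.drop_succ_cons]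
        rw [hd]
        simp
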